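-- pv_equiv track=rewrite | github.com/YanaKoleva/Python | January/wordcomps_031.py | seen
-- ===== SOURCE A (Python) =====
-- def seen(word):
--    a = "angel"
--    if word != "angle":
--       for w in word:
--          if w.lower() not in a:
--             return False
--          elif w.lower() in a:
--             a = a.replace(w.lower(), "", 1)
--       if len(a) == 0:
--          return True
--       else:
--          return False
--    return False
-- ===== SOURCE B (Python) =====
-- def seen(word):
--     return sorted(c.lower() for c in word) == sorted("angel") and word != "angle"
-- ===== Notes on version B (the rewrite author's own statement) =====
-- stated objective: simpler
-- what changed: Replaced the letter-by-letter removal loop over a shrinking copy of 'angel' by a single sorted-multiset comparison of the lowercased characters with sorted('angel'), keeping the literal word != 'angle' guard.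
import Mathlib
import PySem

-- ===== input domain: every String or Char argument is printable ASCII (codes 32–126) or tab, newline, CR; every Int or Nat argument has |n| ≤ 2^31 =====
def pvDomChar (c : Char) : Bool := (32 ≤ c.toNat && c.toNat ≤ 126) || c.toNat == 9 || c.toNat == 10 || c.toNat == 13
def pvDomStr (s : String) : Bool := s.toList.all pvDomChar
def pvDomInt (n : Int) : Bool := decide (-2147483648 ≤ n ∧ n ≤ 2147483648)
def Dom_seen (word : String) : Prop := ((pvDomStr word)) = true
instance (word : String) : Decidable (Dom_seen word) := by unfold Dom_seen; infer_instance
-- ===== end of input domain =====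

-- B replaces A's remove-one-matched-letter loop over a shrinking copy of "angel" by a
-- single sorted-multiset comparison (objective: simpler).

-- ===== PORT A =====
-- the for-loop: state is the remaining letters of a ("angel" with matched letters removed).
-- `w.lower() in a` for the single char w is list membership; `a.replace(w.lower(), "", 1)`
-- removes the FIRST occurrence of that single char, which is exactly List.erase (exact here).
def seenLoop : List Char → List Char → Bool
  | [], a => decide (a.length = 0)
  | w :: ws, a =>
    if ¬ (PySem.Chars.lowerChar w ∈ a) then false
    else seenLoop ws (a.erase (PySem.Chars.lowerChar w))

def seen (word : String) : Bool :=
  if word ≠ "angle" then seenLoop word.toList "angel".toList else false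

-- ===== PORT B =====
def seen_alt (word : String) : Bool :=
  (PySem.List.sorted (word.toList.map PySem.Chars.lowerChar) (fun x => x) false
      == PySem.List.sorted "angel".toList (fun x => x) false)
    && (word != "angle")

-- ===== PRECONDITION & SPEC =====
def Spec_seen (word : String) (out : Bool) : Prop := out = seen_alt word
instance (word : String) (out : Bool) : Decidable (Spec_seen word out) := by unfold Spec_seen; infer_instance

-- ===== CLAIM (what is proved, stated in full; the proofs are below) =====
def Claim_equal_seen : Prop := ∀ (word : String), Dom_seen word → Spec_seen word (seen word)

-- ===== LEMMAS AND PROOFS =====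

theorem seenLoop_eq_perm (l a : List Char) :
    seenLoop l a = decide ((l.map PySem.Chars.lowerChar).Perm a) := by
  induction l generalizing a with
  | nil =>
    simp [seenLoop, List.length_eq_zero_iff]
  | cons w ws ih =>
    by_cases h : PySem.Chars.lowerChar w ∈ a
    · rw [seenLoop, if_neg (by simpa using h), ih]
      have : ((PySem.Chars.lowerChar w :: ws.map PySem.Chars.lowerChar).Perm a) ↔
          ((ws.map PySem.Chars.lowerChar).Perm (a.erase (PySem.Chars.lowerChar w))) := by
        rw [List.cons_perm_iff_perm_erase]
        exact ⟨fun ⟨_, hp⟩ => hp, fun hp => ⟨h, hp⟩⟩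
      simp [this]
    · rw [seenLoop, if_pos (by simpa using h)]
      have : ¬ ((PySem.Chars.lowerChar w :: ws.map PySem.Chars.lowerChar).Perm a) := by
        intro hp
        exact h (hp.mem_iff.mp (List.mem_cons_self))
      simp [this]

-- ===== VERDICT (by name: the statement is the Claim_ definition above) =====
theorem seen_spec : Claim_equal_seen := by
  intro word _
  unfold Spec_seen seen seen_alt
  by_cases hw : word = "angle"
  · simp [hw]
  · rw [if_pos hw, seenLoop_eq_perm]
    have hs := PySem.List.sorted_id_eq_sorted_id_iff_perm
      (xs := word.toList.map PySem.Chars.lowerChar) (ys := ['a', 'n', 'g', 'e', 'l'])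
    have hne : (word != "angle") = true := bne_iff_ne.mpr hw
    by_cases hp : (word.toList.map PySem.Chars.lowerChar).Perm ['a', 'n', 'g', 'e', 'l']
    · simp [hp, hs.mpr hp, hne]
    · have hns : ¬ ((PySem.List.sorted (word.toList.map PySem.Chars.lowerChar) (fun x => x) false) =
          PySem.List.sorted ['a', 'n', 'g', 'e', 'l'] (fun x => x) false) := fun h => hp (hs.mp h)
      simp [hp, hns]
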